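-- pv_equiv track=rewrite | github.com/8060162/projeto25-26_AI2 | Chunking/parsing/structure_parser.py | _has_non_contiguous_lettered_sequence
-- ===== SOURCE A (Python) =====
-- from typing import List, Optional, Sequence, Tuple, Union
--
-- def _has_non_contiguous_lettered_sequence(labels: List[str]) -> bool:
--     """
--     Validate whether recovered lettered labels form a contiguous sequence.
--
--     Accepted examples
--     -----------------
--     - a, b
--     - a, b, c
--
--     Suspicious examples
--     -------------------
--     - b, c
--     - a, c
--     - c, d
--     """
--     if len(labels) < 2:
--         return False
--
--     normalized_labels = [label for label in labels if len(label) == 1 and label.isalpha()]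
--     if len(normalized_labels) != len(labels):
--         return True
--
--     if normalized_labels[0] != "a":
--         return True
--
--     previous_codepoint = ord(normalized_labels[0])
--     for label in normalized_labels[1:]:
--         current_codepoint = ord(label)
--         if current_codepoint - previous_codepoint != 1:
--             return True
--         previous_codepoint = current_codepoint
--
--     return False
-- ===== SOURCE B (Python) =====
-- from typing import List
--
--
-- def _has_non_contiguous_lettered_sequence(labels: List[str]) -> bool:
--     if len(labels) < 2:
--         return False
--     # The only acceptable list is the contiguous run 'a', 'b', ... (it can never
--     # go past 'z', since labels past 'z' are not letters); compare against it.
--     expected = [chr(c) for c in range(ord("a"), min(ord("a") + len(labels), ord("z") + 1))]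
--     return labels != expected
-- ===== Notes on version B (the rewrite author's own statement) =====
-- stated objective: simpler
-- what changed: Replaces A's filter pass, first-element check and codepoint-difference loop by constructing the unique acceptable list ['a','b',...] (capped at 'z', so at most 26 elements) and returning a single list inequality.
import Mathlib
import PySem

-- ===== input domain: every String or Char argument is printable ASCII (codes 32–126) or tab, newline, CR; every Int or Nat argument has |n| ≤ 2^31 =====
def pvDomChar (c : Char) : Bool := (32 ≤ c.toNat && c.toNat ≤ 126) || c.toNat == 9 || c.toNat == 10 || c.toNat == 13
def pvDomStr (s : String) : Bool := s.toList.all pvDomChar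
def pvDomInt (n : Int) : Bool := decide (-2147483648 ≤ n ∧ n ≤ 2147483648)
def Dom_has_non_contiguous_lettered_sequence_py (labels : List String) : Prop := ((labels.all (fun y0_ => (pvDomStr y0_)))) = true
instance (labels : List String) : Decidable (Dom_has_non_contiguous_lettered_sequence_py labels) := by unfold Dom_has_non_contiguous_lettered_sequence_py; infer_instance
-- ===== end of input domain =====

-- B replaces A's filter pass, first-element check and codepoint loop by building the
-- unique acceptable list ['a','b',…] (capped at 'z') and one list comparison (simpler).

-- ===== PORT A =====
-- ord(label): exact on single-char strings (the only call sites, guaranteed by the filter)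
def pvOrd (s : String) : Int := ((s.toList.headD (Char.ofNat 0)).toNat : Int)

-- the `for label in normalized_labels[1:]` loop, with previous_codepoint as state
def pvLoopA (prev : Int) : List String → Bool
  | [] => false
  | l :: t => if pvOrd l - prev ≠ 1 then true else pvLoopA (pvOrd l) t

def has_non_contiguous_lettered_sequence_py (labels : List String) : Bool :=
  if labels.length < 2 then false
  else
    let normalized := labels.filter (fun label => PySem.Str.len label == 1 && PySem.Str.strIsalpha label)
    if normalized.length ≠ labels.length then true
    else if normalized.headD "" ≠ "a" then true  -- normalized[0]: exact, normalized nonempty here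
    else pvLoopA (pvOrd (normalized.headD "")) (PySem.List.slice normalized (some 1) none)

-- ===== PORT B =====
def has_non_contiguous_lettered_sequence_py_alt (labels : List String) : Bool :=
  if labels.length < 2 then false
  else
    -- chr(c) for 97 ≤ c ≤ 122: exact as String.ofList [Char.ofNat c]
    let expected := (PySem.List.pyRange 97 (min (97 + (labels.length : Int)) 123) 1).map
      (fun c => String.ofList [Char.ofNat c.toNat])
    labels != expected

-- ===== PRECONDITION & SPEC =====
def Spec_has_non_contiguous_lettered_sequence_py (labels : List String) (out : Bool) : Prop := out = has_non_contiguous_lettered_sequence_py_alt labels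
instance (labels : List String) (out : Bool) : Decidable (Spec_has_non_contiguous_lettered_sequence_py labels out) := by unfold Spec_has_non_contiguous_lettered_sequence_py; infer_instance

-- ===== CLAIM (what is proved, stated in full; the proofs are below) =====
def Claim_equal_has_non_contiguous_lettered_sequence_py : Prop := ∀ (labels : List String), Dom_has_non_contiguous_lettered_sequence_py labels → Spec_has_non_contiguous_lettered_sequence_py labels (has_non_contiguous_lettered_sequence_py labels)

-- ===== LEMMAS AND PROOFS =====

-- the contiguous run of single-letter strings starting at codepoint c, length n
def pvExpected (c : Nat) : Nat → List String
  | 0 => []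
  | n + 1 => String.ofList [Char.ofNat c] :: pvExpected (c + 1) n

lemma pvExpected_length (c n : Nat) : (pvExpected c n).length = n := by
  induction n generalizing c with
  | zero => rfl
  | succ n ih => simp [pvExpected, ih]

lemma pvRange_map_eq (n : Nat) : ∀ c : Nat,
    (PySem.List.pyRange (c : Int) ((c : Int) + n) 1).map (fun x => String.ofList [Char.ofNat x.toNat])
      = pvExpected c n := by
  induction n with
  | zero => intro c; simp [PySem.List.pyRange, pvExpected]
  | succ n ih =>
    intro c
    rw [PySem.List.pyRange_one_cons (by omega)]
    have hcast : (c : Int) + ((n + 1 : Nat) : Int) = ((c + 1 : Nat) : Int) + (n : Int) := by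
      push_cast; ring
    simp only [List.map_cons, Int.toNat_natCast]
    rw [show (c : Int) + 1 = ((c + 1 : Nat) : Int) by push_cast; ring]
    rw [show (c : Int) + ((n + 1 : Nat) : Int) = ((c + 1 : Nat) : Int) + ((n : Nat) : Int) by push_cast; ring]
    rw [ih (c + 1)]
    rfl

lemma pvToNat_ofNat (k : Nat) (h : k < 55296) : (Char.ofNat k).toNat = k := by
  simp [Char.ofNat, Nat.isValidChar, h]

lemma pvExpected_pred : ∀ k < 123, 97 ≤ k →
    (PySem.Str.len (String.ofList [Char.ofNat k]) == 1 &&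
      PySem.Str.strIsalpha (String.ofList [Char.ofNat k])) = true := by decide

lemma pvAlpha_ascii : ∀ k < 127, PySem.Chars.isalpha (Char.ofNat k) = true → k ≤ 122 := by decide

-- a single-char, alphabetic, printable-ASCII string has codepoint ≤ 122
lemma pvChar_bound (ch : Char) (hdom : ch.toNat ≤ 126)
    (ha : PySem.Chars.isalpha ch = true) : ch.toNat ≤ 122 :=
  pvAlpha_ascii ch.toNat (by omega) (by rwa [Char.ofNat_toNat])

lemma pvSingleton_of_pred (l : String)
    (h : (PySem.Str.len l == 1 && PySem.Str.strIsalpha l) = true) :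
    ∃ ch, l = String.ofList [ch] ∧ PySem.Chars.isalpha ch = true := by
  simp only [Bool.and_eq_true, beq_iff_eq, PySem.Str.len_eq] at h
  obtain ⟨h1, h2⟩ := h
  have hlen : l.toList.length = 1 := by exact_mod_cast h1
  obtain ⟨ch, hch⟩ : ∃ ch, l.toList = [ch] := by
    cases hl : l.toList with
    | nil => simp [hl] at hlen
    | cons a t => cases t with
      | nil => exact ⟨a, rfl⟩
      | cons b u => simp [hl] at hlen
  refine ⟨ch, ?_, ?_⟩
  · apply String.toList_inj.mp; simpa using hch
  · simpa [PySem.Str.strIsalpha, PySem.Chars.strIsalpha, hch] using h2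

-- the codepoint loop succeeds on a contiguous run
lemma pvLoop_expected : ∀ (n c : Nat), 97 ≤ c → c + n ≤ 122 →
    pvLoopA (c : Int) (pvExpected (c + 1) n) = false := by
  intro n
  induction n with
  | zero => intro c _ _; rfl
  | succ n ih =>
    intro c hc hb
    have hv : (Char.ofNat (c + 1)).toNat = c + 1 := pvToNat_ofNat _ (by omega)
    simp only [pvExpected, pvLoopA, pvOrd, String.toList_ofList, List.headD_cons, hv]
    rw [if_neg (by push_cast; omega)]
    have := ih (c + 1) (by omega) (by omega)
    simpa using this

-- the codepoint loop succeeding forces exactly the contiguous run (and a bound)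
lemma pvLoop_false_eq : ∀ (ls : List String) (c : Nat), 97 ≤ c → c ≤ 122 →
    (∀ s ∈ ls, pvDomStr s = true) →
    (∀ s ∈ ls, (PySem.Str.len s == 1 && PySem.Str.strIsalpha s) = true) →
    pvLoopA (c : Int) ls = false →
    ls = pvExpected (c + 1) ls.length ∧ c + ls.length ≤ 122 := by
  intro ls
  induction ls with
  | nil => intro c hc hb _ _ _; exact ⟨rfl, by simpa using hb⟩
  | cons l t ih =>
    intro c hc hb hdom hpred hloop
    obtain ⟨ch, rfl, hal⟩ := pvSingleton_of_pred l (hpred l List.mem_cons_self)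
    have hdch : ch.toNat ≤ 126 := by
      have := hdom _ List.mem_cons_self
      simp [pvDomStr, pvDomChar] at this
      omega
    have hch122 : ch.toNat ≤ 122 := pvChar_bound ch hdch hal
    simp only [pvLoopA, pvOrd, String.toList_ofList, List.headD_cons] at hloop
    by_cases hstep : (ch.toNat : Int) - (c : Int) ≠ 1
    · simp [hstep] at hloop
    · push_neg at hstep
      have hcc : ch.toNat = c + 1 := by omega
      rw [if_neg (by omega)] at hloop
      rw [hcc] at hloop
      push_cast at hloop
      rw [show (c : Int) + 1 = ((c + 1 : Nat) : Int) by push_cast; ring] at hloop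
      obtain ⟨ht, hb2⟩ := ih (c + 1) (by omega) (by omega)
        (fun s hs => hdom s (List.mem_cons_of_mem _ hs))
        (fun s hs => hpred s (List.mem_cons_of_mem _ hs)) hloop
      constructor
      · simp only [List.length_cons, pvExpected]
        rw [← hcc, Char.ofNat_toNat, hcc, ← ht]
      · simp only [List.length_cons]; omega

-- every element of the contiguous run (within a..z) passes A's filter
lemma pvExpected_all_pred : ∀ (n c : Nat), 97 ≤ c → c + n ≤ 123 →
    ∀ s ∈ pvExpected c n, (PySem.Str.len s == 1 && PySem.Str.strIsalpha s) = true := by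
  intro n
  induction n with
  | zero => intro c _ _ s hs; simp [pvExpected] at hs
  | succ n ih =>
    intro c hc hb s hs
    simp only [pvExpected, List.mem_cons] at hs
    rcases hs with rfl | hs
    · exact pvExpected_pred c (by omega) hc
    · exact ih (c + 1) (by omega) (by omega) s hs

lemma pvB_expected (labels : List String) (h2 : ¬ labels.length < 2) :
    (PySem.List.pyRange 97 (min (97 + (labels.length : Int)) 123) 1).map
      (fun c => String.ofList [Char.ofNat c.toNat]) = pvExpected 97 (min labels.length 26) := by
  have h : min (97 + (labels.length : Int)) 123 = ((97 : Nat) : Int) + ((min labels.length 26 : Nat) : Int) := by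
    omega
  rw [show (97 : Int) = ((97 : Nat) : Int) by norm_num] at h ⊢
  rw [h, pvRange_map_eq]

lemma pvSlice_one (xs : List String) : PySem.List.slice xs (some 1) none = xs.drop 1 := by
  rw [PySem.List.slice_from] <;> norm_num

lemma pvA_eq_false_iff (labels : List String) (hdom : ∀ s ∈ labels, pvDomStr s = true)
    (h2 : ¬ labels.length < 2) :
    has_non_contiguous_lettered_sequence_py labels = false ↔
      labels = pvExpected 97 (min labels.length 26) := by
  unfold has_non_contiguous_lettered_sequence_py
  rw [if_neg h2]
  set p := fun label => PySem.Str.len label == 1 && PySem.Str.strIsalpha label with hp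
  constructor
  · intro hA
    by_cases hlen : (labels.filter p).length ≠ labels.length
    · rw [if_pos hlen] at hA; exact absurd hA (by simp)
    · push_neg at hlen
      have hfil : labels.filter p = labels := List.Sublist.eq_of_length List.filter_sublist hlen
      have hall : ∀ s ∈ labels, p s = true := List.filter_eq_self.mp hfil
      rw [if_neg (by omega : ¬ (labels.filter p).length ≠ labels.length), hfil] at hA
      by_cases hhead : labels.headD "" ≠ "a"
      · rw [if_pos hhead] at hA; exact absurd hA (by simp)
      · push_neg at hhead
        rw [if_neg (fun h => h hhead)] at hA
        obtain ⟨l0, t, rfl⟩ : ∃ l0 t, labels = l0 :: t := by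
          cases labels with
          | nil => simp at h2
          | cons a t => exact ⟨a, t, rfl⟩
        simp only [List.headD_cons] at hhead
        subst hhead
        rw [List.headD_cons, pvSlice_one] at hA
        simp only [List.drop_one, List.tail_cons] at hA
        have hOrd : pvOrd "a" = ((97 : Nat) : Int) := by decide
        rw [hOrd] at hA
        obtain ⟨ht, hb⟩ := pvLoop_false_eq t 97 (by omega) (by omega)
          (fun s hs => hdom s (List.mem_cons_of_mem _ hs))
          (fun s hs => hall s (List.mem_cons_of_mem _ hs)) hA
        have hle : ("a" :: t : List String).length ≤ 26 := by
          simp only [List.length_cons]; omega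
        rw [min_eq_left hle]
        have hl0 : ("a" : String) = String.ofList [Char.ofNat 97] := by decide
        simp only [List.length_cons, pvExpected]
        exact List.cons_eq_cons.mpr ⟨hl0, by simpa using ht⟩
  · intro hEq
    have hlenE := congrArg List.length hEq
    rw [pvExpected_length] at hlenE
    have hle : labels.length ≤ 26 := by omega
    rw [min_eq_left hle] at hEq
    have hall : ∀ s ∈ labels, p s = true := by
      intro s hs
      rw [hEq] at hs
      exact pvExpected_all_pred labels.length 97 (by omega) (by omega) s hs
    have hfil : labels.filter p = labels := List.filter_eq_self.mpr hall
    rw [hfil, if_neg (by omega : ¬ labels.length ≠ labels.length)]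
    obtain ⟨l0, t, rfl⟩ : ∃ l0 t, labels = l0 :: t := by
      cases labels with
      | nil => simp at h2
      | cons a t => exact ⟨a, t, rfl⟩
    simp only [List.length_cons] at hEq hle ⊢
    rw [pvExpected] at hEq
    obtain ⟨h0, ht⟩ := List.cons_eq_cons.mp hEq
    subst h0
    have hhead : (String.ofList [Char.ofNat 97] :: t).headD "" = "a" := by
      rw [List.headD_cons]
    rw [if_neg (fun h => h hhead), hhead, pvSlice_one]
    simp only [List.drop_one, List.tail_cons]
    rw [ht]
    have hOrd : pvOrd "a" = ((97 : Nat) : Int) := by decide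
    rw [hOrd]
    exact pvLoop_expected t.length 97 (by omega) (by omega)

-- ===== VERDICT (by name: the statement is the Claim_ definition above) =====
theorem has_non_contiguous_lettered_sequence_py_spec : Claim_equal_has_non_contiguous_lettered_sequence_py := by
  intro labels hdom
  unfold Spec_has_non_contiguous_lettered_sequence_py
  have hdom2 : ∀ s ∈ labels, pvDomStr s = true := by
    unfold Dom_has_non_contiguous_lettered_sequence_py at hdom
    rw [List.all_eq_true] at hdom
    exact hdom
  unfold has_non_contiguous_lettered_sequence_py_alt
  by_cases h2 : labels.length < 2
  · rw [if_pos h2]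
    unfold has_non_contiguous_lettered_sequence_py
    rw [if_pos h2]
  · rw [if_neg h2]
    simp only [pvB_expected labels h2]
    have hiff := pvA_eq_false_iff labels hdom2 h2
    by_cases hEq : labels = pvExpected 97 (min labels.length 26)
    · rw [hiff.mpr hEq, bne_eq_false_iff_eq.mpr hEq]
    · have hA : has_non_contiguous_lettered_sequence_py labels = true := by
        cases hA : has_non_contiguous_lettered_sequence_py labels with
        | false => exact absurd (hiff.mp hA) hEq
        | true => rfl
      rw [hA, bne_iff_ne.mpr hEq]
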